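-- pv_equiv track=rewrite | github.com/Kudito98/Codesignal-tasks | intro/22-avoidObstacles/avoidObstacles.py | solution
-- ===== SOURCE A (Python) =====
-- def solution(inputArray):
--     obs = sorted(inputArray)
--     jump_dist = 1
--     obstacle_hit = True
--
--     while(obstacle_hit):
--         obstacle_hit = False
--         jump_dist += 1
--
--         for i in range(len(obs)):
--             if obs[i] % jump_dist == 0:
--                 obstacle_hit = True
--                 break
--
--     return jump_dist
-- ===== SOURCE B (Python) =====
-- def solution(inputArray):
--     s = set()
--     m = 0
--     for x in inputArray:
--         a = abs(x)
--         s.add(a)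
--         m = max(m, a)
--     d = 2
--     while True:
--         if m // d <= len(s):
--             hit = any(k in s for k in range(d, m + 1, d))
--         else:
--             hit = any(a % d == 0 for a in s)
--         if not hit:
--             return d
--         d += 1
-- ===== Notes on version B (the rewrite author's own statement) =====
-- stated objective: faster
-- what changed: Instead of re-scanning every obstacle for divisibility at each candidate jump (after a sort A never needs), B builds the set of distinct absolute obstacle values plus their maximum in one pass and tests each candidate d by whichever is cheaper: set membership of the multiples d, 2d, ... up to the maximum, or divisibility over the distinct values.
import Mathlib
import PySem

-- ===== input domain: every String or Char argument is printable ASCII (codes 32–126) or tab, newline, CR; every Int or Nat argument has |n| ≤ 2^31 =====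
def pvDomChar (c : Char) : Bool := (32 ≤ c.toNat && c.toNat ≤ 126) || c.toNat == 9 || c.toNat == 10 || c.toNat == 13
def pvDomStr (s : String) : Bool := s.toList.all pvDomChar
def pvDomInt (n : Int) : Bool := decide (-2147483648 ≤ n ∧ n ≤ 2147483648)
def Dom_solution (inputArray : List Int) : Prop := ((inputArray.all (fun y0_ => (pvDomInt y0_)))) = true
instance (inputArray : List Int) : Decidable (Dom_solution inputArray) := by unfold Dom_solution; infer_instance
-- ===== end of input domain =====

-- B replaces A's per-candidate divisibility scan over the (needlessly sorted) obstacles by a one-pass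
-- set-of-absolute-values + running max; each candidate d is then tested by whichever is cheaper:
-- set membership of the multiples d, 2d, … ≤ max, or divisibility over the distinct absolute values.

-- ===== PORT A =====
-- A's while loop: jump_dist += 1, then scan the obstacles for one divisible by jump_dist (the
-- for-with-break is an existence test). The fuel is only a totality guard: for inputs without 0
-- the loop provably stops at jump_dist = max|x| + 1 at the latest, and the fuel is never exhausted.
def aLoop (obs : List Int) : Nat → Int → Int
  | 0, d => d
  | fuel+1, d =>
    if obs.any (fun o => PySem.Int.mod o (d + 1) == 0) then aLoop obs fuel (d + 1)
    else d + 1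

def solution (inputArray : List Int) : Int :=
  aLoop (PySem.List.sorted inputArray (fun x => x) false)
    ((inputArray.foldl (fun acc x => max acc |x|) 0).toNat + 1) 1

-- ===== PORT B =====
-- B's while loop: does any multiple d, 2d, … ≤ m lie in the set of absolute obstacle values?
-- The fuel is only a totality guard: the test at d = m + 1 is over an empty range, so the loop
-- always stops by then and the fuel is never exhausted.
def altHit (s : PySem.Set Int) (m : Int) (d : Int) : Bool :=
  if PySem.Int.floordiv m d ≤ PySem.Set.len s then
    (PySem.List.pyRange d (m + 1) d).any (fun k => PySem.Set.contains s k)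
  else
    s.any (fun a => PySem.Int.mod a d == 0)

def altLoop (s : PySem.Set Int) (m : Int) : Nat → Int → Int
  | 0, d => d
  | fuel+1, d =>
    if altHit s m d then altLoop s m fuel (d + 1)
    else d

def solution_alt (inputArray : List Int) : Int :=
  let sm := inputArray.foldl
    (fun (acc : PySem.Set Int × Int) x => (PySem.Set.add acc.1 |x|, max acc.2 |x|))
    (PySem.Set.empty, 0)
  altLoop sm.1 sm.2 (sm.2.toNat + 1) 2

-- ===== PRECONDITION & SPEC =====
-- Pre_ excludes inputs containing 0: there A's while loop never terminates (0 % d == 0 for every d),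
-- so A returns on exactly the inputs admitted here.
def Pre_solution (inputArray : List Int) : Prop := (0 : Int) ∉ inputArray
instance (inputArray : List Int) : Decidable (Pre_solution inputArray) := by
  unfold Pre_solution; infer_instance

def pvWitness_solution : List Int := [5, 3, 6, 7, 9]

def Spec_solution (inputArray : List Int) (out : Int) : Prop := out = solution_alt inputArray
instance (inputArray : List Int) (out : Int) : Decidable (Spec_solution inputArray out) := by
  unfold Spec_solution; infer_instance

-- ===== CLAIM (what is proved, stated in full; the proofs are below) =====
def Claim_equal_solution : Prop := ∀ (inputArray : List Int), Dom_solution inputArray →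
  Pre_solution inputArray → Spec_solution inputArray (solution inputArray)

-- ===== LEMMAS AND PROOFS =====

-- A's test and B's test agree at every candidate d ≥ 2 (for inputs without 0).
lemma pred_eq (xs : List Int) (h0 : (0 : Int) ∉ xs) (d : Int) (hd : 2 ≤ d) :
    (PySem.List.sorted xs (fun x => x) false).any (fun o => PySem.Int.mod o d == 0)
      = altHit (PySem.Set.ofList (xs.map (fun x => |x|)))
          (xs.foldl (fun acc x => max acc |x|) 0) d := by
  set M := xs.foldl (fun acc x => max acc |x|) 0 with hM
  have hMub : ∀ x ∈ xs, |x| ≤ M := (PySem.List.le_foldl_max_int xs (fun x => |x|) 0).2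
  unfold altHit
  split_ifs with hcost
  · apply Bool.eq_iff_iff.mpr
    simp only [List.any_eq_true, PySem.List.mem_sorted, beq_iff_eq,
      PySem.Int.mod_eq_zero_iff_dvd, PySem.Set.contains_iff, PySem.Set.mem_ofList,
      PySem.List.mem_pyRange_iff_of_pos (by omega : (0:Int) < d), List.mem_map]
    constructor
    · rintro ⟨o, ho, hdvd⟩
      have hone : o ≠ 0 := fun h => h0 (h ▸ ho)
      have hdvdabs : d ∣ |o| := (dvd_abs d o).mpr hdvd
      have hpos : (0:Int) < |o| := abs_pos.mpr hone
      refine ⟨|o|, ⟨Int.le_of_dvd hpos hdvdabs, by have := hMub o ho; omega,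
        dvd_sub hdvdabs dvd_rfl⟩, o, ho, rfl⟩
    · rintro ⟨k, ⟨hdk, _, hdvd⟩, o, ho, hko⟩
      have : d ∣ k := by
        have := dvd_add hdvd (dvd_refl d); simpa using this
      exact ⟨o, ho, (dvd_abs d o).mp (hko ▸ this)⟩
  · apply Bool.eq_iff_iff.mpr
    simp only [List.any_eq_true, PySem.List.mem_sorted, beq_iff_eq,
      PySem.Int.mod_eq_zero_iff_dvd, PySem.Set.mem_ofList, List.mem_map]
    constructor
    · rintro ⟨o, ho, hdvd⟩
      exact ⟨|o|, ⟨o, ho, rfl⟩, (dvd_abs d o).mpr hdvd⟩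
    · rintro ⟨a, ⟨o, ho, hao⟩, hdvd⟩
      exact ⟨o, ho, (dvd_abs d o).mp (hao ▸ hdvd)⟩

-- the two fueled loops step together and return the same first good candidate
lemma loops_eq (obs : List Int) (s : PySem.Set Int) (M T : Int)
    (hpq : ∀ t : Int, 2 ≤ t →
      obs.any (fun o => PySem.Int.mod o t == 0) = altHit s M t)
    (hT : obs.any (fun o => PySem.Int.mod o T == 0) = false) :
    ∀ (fuel : Nat) (d : Int), 1 ≤ d → d < T → T ≤ d + fuel →
      aLoop obs fuel d = altLoop s M fuel (d + 1) := by
  intro fuel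
  induction fuel with
  | zero => intro d _ h1 h2; omega
  | succ f ih =>
    intro d hd hdT hTf
    have h2 : (2 : Int) ≤ d + 1 := by omega
    simp only [aLoop, altLoop, ← hpq (d + 1) h2]
    by_cases hp : obs.any (fun o => PySem.Int.mod o (d + 1) == 0) = true
    · have hne : d + 1 ≠ T := fun h => by rw [h, hT] at hp; exact absurd hp (by simp)
      simp only [hp, if_true]
      exact ih (d + 1) (by omega) (by omega) (by push_cast at hTf ⊢; omega)
    · simp only [Bool.not_eq_true] at hp
      simp [hp]

-- the pair fold of B is the set fold and the max fold
lemma fold_pair (xs : List Int) :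
    xs.foldl (fun (acc : PySem.Set Int × Int) x => (PySem.Set.add acc.1 |x|, max acc.2 |x|))
        (PySem.Set.empty, 0)
      = (PySem.Set.ofList (xs.map (fun x => |x|)), xs.foldl (fun acc x => max acc |x|) 0) := by
  rw [PySem.List.foldl_prod_mk (f := fun s (x : Int) => PySem.Set.add s |x|)
        (g := fun m (x : Int) => max m |x|)]
  rw [PySem.Set.ofList_eq_foldl, List.foldl_map]
  rfl

-- ===== VERDICT (by name: the statement is the Claim_ definition above) =====
theorem solution_spec : Claim_equal_solution := by
  intro xs _ hpre
  unfold Spec_solution solution solution_alt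
  rw [fold_pair]
  set M := xs.foldl (fun acc x => max acc |x|) 0 with hM
  have hM0 : 0 ≤ M := (PySem.List.le_foldl_max_int xs (fun x => |x|) 0).1
  have hMub : ∀ x ∈ xs, |x| ≤ M := (PySem.List.le_foldl_max_int xs (fun x => |x|) 0).2
  have hT : (PySem.List.sorted xs (fun x => x) false).any
      (fun o => PySem.Int.mod o (max 2 (M + 1)) == 0) = false := by
    apply Bool.eq_false_iff.mpr
    simp only [ne_eq, List.any_eq_true, PySem.List.mem_sorted, beq_iff_eq,
      PySem.Int.mod_eq_zero_iff_dvd, not_exists, not_and]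
    intro o ho hdvd
    have hone : o ≠ 0 := fun h => hpre (h ▸ ho)
    have := Int.le_of_dvd (abs_pos.mpr hone) ((dvd_abs _ o).mpr hdvd)
    have := hMub o ho
    have : max 2 (M + 1) ≤ M := by omega
    omega
  have := loops_eq (PySem.List.sorted xs (fun x => x) false)
    (PySem.Set.ofList (xs.map (fun x => |x|))) M (max 2 (M + 1))
    (fun t ht => pred_eq xs hpre t ht) hT (M.toNat + 1) 1 (by omega) (by omega)
    (by push_cast; omega)
  simpa using this
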